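-- pv_equiv track=rewrite | github.com/radoslav77/rota_app | rota/excel_parser.py | extract_name_role
-- ===== SOURCE A (Python) =====
-- def extract_name_role(cell_val):
--     """Split 'John Smith CHEF DE PARTIE' into name and role"""
--     if not cell_val:
--         return '', ''
--     val = str(cell_val).strip()
--     # Known role suffixes
--     roles = [
--         'EXECUTIVE CHEF', 'SOUS CHEF', 'JR. SOUS CHEF', 'JR SOUS CHEF',
--         'CHEF DE PARTIE', 'DEMI CHEF DE PARTIE', 'DEMI CHEF',
--         'COMMIS CHEF', 'NIGHT CHEF DE PARTIE', 'PASTRY CHEF',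
--         'NIGHT BAKER', 'SOUS', 'PART TIME', '(PART TIME)',
--     ]
--     role = ''
--     name = val
--     for r in sorted(roles, key=len, reverse=True):
--         idx = val.upper().find(r)
--         if idx > 0:
--             name = val[:idx].strip()
--             role = val[idx:].strip()
--             break
--     return name, role
-- ===== SOURCE B (Python) =====
-- def extract_name_role(cell_val):
--     """Split 'John Smith CHEF DE PARTIE' into name and role"""
--     if not cell_val:
--         return '', ''
--     val = str(cell_val).strip()
--     roles = [
--         'EXECUTIVE CHEF', 'SOUS CHEF', 'JR. SOUS CHEF', 'JR SOUS CHEF',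
--         'CHEF DE PARTIE', 'DEMI CHEF DE PARTIE', 'DEMI CHEF',
--         'COMMIS CHEF', 'NIGHT CHEF DE PARTIE', 'PASTRY CHEF',
--         'NIGHT BAKER', 'SOUS', 'PART TIME', '(PART TIME)',
--     ]
--     up = val.upper()
--     candidates = [(up.find(r), r) for r in roles if up.find(r) > 0]
--     if not candidates:
--         return val, ''
--     idx, _ = max(candidates, key=lambda c: len(c[1]))
--     return val[:idx].strip(), val[idx:].strip()
-- ===== Notes on version B (the rewrite author's own statement) =====
-- stated objective: alternative
-- what changed: Replaces A's sort-roles-by-length-then-break-on-first-hit loop with a single pass that collects all (index, role) matches in original list order and selects the longest via max (first maximal, reproducing A's stable-sort tie-breaking).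
import Mathlib
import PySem

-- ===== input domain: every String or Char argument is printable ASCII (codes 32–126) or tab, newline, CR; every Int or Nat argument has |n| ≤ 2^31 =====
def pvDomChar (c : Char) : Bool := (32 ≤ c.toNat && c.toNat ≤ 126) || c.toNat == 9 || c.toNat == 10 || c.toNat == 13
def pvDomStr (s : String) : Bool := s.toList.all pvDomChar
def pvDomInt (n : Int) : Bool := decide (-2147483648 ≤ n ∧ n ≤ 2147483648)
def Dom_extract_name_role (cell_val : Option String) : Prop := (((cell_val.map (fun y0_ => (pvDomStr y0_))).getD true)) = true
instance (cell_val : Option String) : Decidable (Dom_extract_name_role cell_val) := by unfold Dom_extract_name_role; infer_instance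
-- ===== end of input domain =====

-- B replaces A's sort-by-length-then-break loop by one pass collecting all matches and a
-- max-by-length selection (same values; an 'alternative' decomposition, no speed claim).

-- ===== PORT A =====
def pyRoles : List String :=
  ["EXECUTIVE CHEF", "SOUS CHEF", "JR. SOUS CHEF", "JR SOUS CHEF",
   "CHEF DE PARTIE", "DEMI CHEF DE PARTIE", "DEMI CHEF",
   "COMMIS CHEF", "NIGHT CHEF DE PARTIE", "PASTRY CHEF",
   "NIGHT BAKER", "SOUS", "PART TIME", "(PART TIME)"]

-- the for-loop with break: first role (in the given order) whose find is > 0 wins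
def aLoop (val : String) : List String → String × String
  | [] => (val, "")
  | r :: rs =>
      let idx := PySem.Str.find (PySem.Str.upper val) r
      if 0 < idx then
        (PySem.Str.strip (PySem.Str.slice val none (some idx)),
         PySem.Str.strip (PySem.Str.slice val (some idx) none))
      else aLoop val rs

def extract_name_role (cell_val : Option String) : String × String :=
  match cell_val with
  | none => ("", "")
  | some s =>
    if s = "" then ("", "")
    else
      let val := PySem.Str.strip s
      aLoop val (PySem.List.sorted pyRoles (fun r => PySem.Str.len r) true)

-- ===== PORT B =====
def pyRolesB : List String :=
  ["EXECUTIVE CHEF", "SOUS CHEF", "JR. SOUS CHEF", "JR SOUS CHEF",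
   "CHEF DE PARTIE", "DEMI CHEF DE PARTIE", "DEMI CHEF",
   "COMMIS CHEF", "NIGHT CHEF DE PARTIE", "PASTRY CHEF",
   "NIGHT BAKER", "SOUS", "PART TIME", "(PART TIME)"]

def extract_name_role_alt (cell_val : Option String) : String × String :=
  match cell_val with
  | none => ("", "")
  | some s =>
    if s = "" then ("", "")
    else
      let val := PySem.Str.strip s
      let up := PySem.Str.upper val
      -- [(up.find(r), r) for r in roles if up.find(r) > 0]
      let candidates :=
        (pyRolesB.filter (fun r => 0 < PySem.Str.find up r)).map
          (fun r => (PySem.Str.find up r, r))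
      -- max(candidates, key=lambda c: len(c[1]))  (max? = Python max with key: first maximal)
      match PySem.List.max? candidates (fun c => PySem.Str.len c.2) with
      | none => (val, "")
      | some c =>
        (PySem.Str.strip (PySem.Str.slice val none (some c.1)),
         PySem.Str.strip (PySem.Str.slice val (some c.1) none))

-- ===== PRECONDITION & SPEC =====
def Spec_extract_name_role (cell_val : Option String) (out : String × String) : Prop := out = extract_name_role_alt cell_val
instance (cell_val : Option String) (out : String × String) : Decidable (Spec_extract_name_role cell_val out) := by unfold Spec_extract_name_role; infer_instance

-- ===== CLAIM (what is proved, stated in full; the proofs are below) =====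
def Claim_equal_extract_name_role : Prop := ∀ (cell_val : Option String), Dom_extract_name_role cell_val → Spec_extract_name_role cell_val (extract_name_role cell_val)

-- ===== LEMMAS AND PROOFS =====

-- first .1 whose flag is true
def firstSatP : List (String × Bool) → Option String
  | [] => none
  | (a, b) :: t => if b then some a else firstSatP t

-- the .1's whose flag is true, in order
def filterP : List (String × Bool) → List String
  | [] => []
  | (a, b) :: t => if b then a :: filterP t else filterP t

-- A's loop = dispatch on the first role matching with positive index
theorem aLoop_eq (val : String) (l : List String) :
    aLoop val l =
      match firstSatP (l.map (fun r => (r, decide (0 < PySem.Str.find (PySem.Str.upper val) r)))) with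
      | none => (val, "")
      | some r =>
        (PySem.Str.strip (PySem.Str.slice val none (some (PySem.Str.find (PySem.Str.upper val) r))),
         PySem.Str.strip (PySem.Str.slice val (some (PySem.Str.find (PySem.Str.upper val) r)) none)) := by
  induction l with
  | nil => rfl
  | cons r rs ih =>
    by_cases h : 0 < PySem.Str.find (PySem.Str.upper val) r
    · simp only [aLoop, List.map_cons, firstSatP, h, decide_true, if_true]
    · simp only [aLoop, List.map_cons, firstSatP, h, decide_false, Bool.false_eq_true,
        if_false, ih]

theorem filter_eq_filterP (p : String → Bool) (l : List String) :
    l.filter p = filterP (l.map (fun r => (r, p r))) := by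
  induction l with
  | nil => simp [filterP]
  | cons a t ih =>
    by_cases h : p a = true <;> simp [filterP, h, ih]

-- the two fold steps of Python max(), named so the fold can be related step by step
def stepK : Option String → String → Option String
  | none, x => some x
  | some m, x => if PySem.Str.len m < PySem.Str.len x then some x else some m

def stepP : Option (Int × String) → Int × String → Option (Int × String)
  | none, x => some x
  | some m, x => if PySem.Str.len m.2 < PySem.Str.len x.2 then some x else some m

theorem step_comm (g : String → Int) (acc : Option String) (a : String) :
    stepP (Option.map (fun r => (g r, r)) acc) (g a, a)
      = Option.map (fun r => (g r, r)) (stepK acc a) := by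
  cases acc with
  | none => rfl
  | some m =>
    simp only [Option.map_some, stepP, stepK]
    by_cases h : PySem.Str.len m < PySem.Str.len a
    · rw [if_pos h, if_pos h]; rfl
    · rw [if_neg h, if_neg h]; rfl

theorem foldl_comm (g : String → Int) (l : List String) : ∀ acc : Option String,
    List.foldl stepP (Option.map (fun r => (g r, r)) acc) (l.map (fun r => (g r, r)))
      = Option.map (fun r => (g r, r)) (List.foldl stepK acc l) := by
  induction l with
  | nil => intro acc; rfl
  | cons a t ih =>
    intro acc
    simp only [List.map_cons, List.foldl_cons, step_comm g acc a]
    exact ih (stepK acc a)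

-- max? over the (idx, role) pairs keyed by role length = max? over the roles keyed by length
theorem max?_map_pair (g : String → Int) (l : List String) :
    PySem.List.max? (l.map (fun r => (g r, r))) (fun c => PySem.Str.len c.2)
      = Option.map (fun r => (g r, r)) (PySem.List.max? l (fun r => PySem.Str.len r)) := by
  have hK : PySem.List.max? l (fun r => PySem.Str.len r) = List.foldl stepK none l := by
    unfold PySem.List.max?
    congr 1
    funext acc x
    cases acc <;> rfl
  have hP : PySem.List.max? (l.map (fun r => (g r, r))) (fun c => PySem.Str.len c.2)
      = List.foldl stepP none (l.map (fun r => (g r, r))) := by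
    unfold PySem.List.max?
    congr 1
    funext acc x
    cases acc <;> rfl
  rw [hK, hP]
  exact foldl_comm g l none

-- the fixed sorted role list, as Python's stable length-descending sort produces it
theorem sorted_roles :
    PySem.List.sorted pyRoles (fun r => PySem.Str.len r) true =
      ["NIGHT CHEF DE PARTIE", "DEMI CHEF DE PARTIE", "EXECUTIVE CHEF", "CHEF DE PARTIE",
       "JR. SOUS CHEF", "JR SOUS CHEF", "COMMIS CHEF", "PASTRY CHEF", "NIGHT BAKER",
       "(PART TIME)", "SOUS CHEF", "DEMI CHEF", "PART TIME", "SOUS"] := by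
  decide

-- the combinatorial core: for every pattern of matches over the 14 fixed roles, the first
-- match in length-descending order is the first longest match in original order
set_option maxHeartbeats 2000000 in
theorem key_select (b0 b1 b2 b3 b4 b5 b6 b7 b8 b9 b10 b11 b12 b13 : Bool) :
    firstSatP [("NIGHT CHEF DE PARTIE", b8), ("DEMI CHEF DE PARTIE", b5), ("EXECUTIVE CHEF", b0),
               ("CHEF DE PARTIE", b4), ("JR. SOUS CHEF", b2), ("JR SOUS CHEF", b3),
               ("COMMIS CHEF", b7), ("PASTRY CHEF", b9), ("NIGHT BAKER", b10),
               ("(PART TIME)", b13), ("SOUS CHEF", b1), ("DEMI CHEF", b6),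
               ("PART TIME", b12), ("SOUS", b11)]
      = PySem.List.max?
          (filterP [("EXECUTIVE CHEF", b0), ("SOUS CHEF", b1), ("JR. SOUS CHEF", b2),
                    ("JR SOUS CHEF", b3), ("CHEF DE PARTIE", b4), ("DEMI CHEF DE PARTIE", b5),
                    ("DEMI CHEF", b6), ("COMMIS CHEF", b7), ("NIGHT CHEF DE PARTIE", b8),
                    ("PASTRY CHEF", b9), ("NIGHT BAKER", b10), ("SOUS", b11),
                    ("PART TIME", b12), ("(PART TIME)", b13)])
          (fun r => PySem.Str.len r) := by
  revert b0 b1 b2 b3 b4 b5 b6 b7 b8 b9 b10 b11 b12 b13; decide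

-- ===== VERDICT (by name: the statement is the Claim_ definition above) =====
theorem extract_name_role_spec : Claim_equal_extract_name_role := by
  intro cell_val _
  unfold Spec_extract_name_role extract_name_role extract_name_role_alt
  cases cell_val with
  | none => rfl
  | some s =>
    by_cases hs : s = ""
    · simp [hs]
    · simp only [hs, if_false]
      set val := PySem.Str.strip s with hval
      set p : String → Bool := fun r => decide (0 < PySem.Str.find (PySem.Str.upper val) r) with hp
      rw [aLoop_eq, sorted_roles,
          show (pyRolesB.filter (fun r => 0 < PySem.Str.find (PySem.Str.upper val) r)) = pyRolesB.filter p by rfl,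
          filter_eq_filterP p pyRolesB,
          max?_map_pair (fun r => PySem.Str.find (PySem.Str.upper val) r)]
      have hsel := key_select (p "EXECUTIVE CHEF") (p "SOUS CHEF") (p "JR. SOUS CHEF")
        (p "JR SOUS CHEF") (p "CHEF DE PARTIE") (p "DEMI CHEF DE PARTIE") (p "DEMI CHEF")
        (p "COMMIS CHEF") (p "NIGHT CHEF DE PARTIE") (p "PASTRY CHEF") (p "NIGHT BAKER")
        (p "SOUS") (p "PART TIME") (p "(PART TIME)")
      simp only [List.map, pyRolesB] at *
      rw [← hsel]
      cases hfs : firstSatP [("NIGHT CHEF DE PARTIE", p "NIGHT CHEF DE PARTIE"),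
        ("DEMI CHEF DE PARTIE", p "DEMI CHEF DE PARTIE"), ("EXECUTIVE CHEF", p "EXECUTIVE CHEF"),
        ("CHEF DE PARTIE", p "CHEF DE PARTIE"), ("JR. SOUS CHEF", p "JR. SOUS CHEF"),
        ("JR SOUS CHEF", p "JR SOUS CHEF"), ("COMMIS CHEF", p "COMMIS CHEF"),
        ("PASTRY CHEF", p "PASTRY CHEF"), ("NIGHT BAKER", p "NIGHT BAKER"),
        ("(PART TIME)", p "(PART TIME)"), ("SOUS CHEF", p "SOUS CHEF"),
        ("DEMI CHEF", p "DEMI CHEF"), ("PART TIME", p "PART TIME"), ("SOUS", p "SOUS")] <;>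
        simp
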